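-- pv_equiv track=rewrite | github.com/mitsuo0114/competitive_programming | python/atcoder/Beginner085/C.py | solve
-- ===== SOURCE A (Python) =====
-- def solve(N, Y):
--     r = [5000 for _ in range(N)]
--     for i in range(N + 1):
--         s = sum(r)
--         if s == Y:
--             return (
--             len([d for d in r if d == 10000]), len([d for d in r if d == 5000]), len([d for d in r if d == 1000]))
--         elif s < Y and i < N:
--             r[i] = 10000
--         elif s > Y and i < N:
--             r[i] = 1000
--     return (-1, -1, -1)
-- ===== SOURCE B (Python) =====
-- def solve(N, Y):
--     # A greedily adjusts N bills starting from all 5000s; it ends on the valid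
--     # split (a x 10000, b x 5000, c x 1000) with the fewest 10000-bills.
--     # Compute that minimal solution of 10000a + 5000b + 1000c = Y, a+b+c = N
--     # directly: with t = (Y - 5000N)/1000 we need 5a - 4c = t, a,c >= 0, a+c <= N.
--     if Y % 1000 != 0:
--         return (-1, -1, -1)
--     t = (Y - 5000 * N) // 1000
--     if t >= 0:
--         q, r = divmod(t, 5)
--         a, c = (q, 0) if r == 0 else (q + r, r)
--     else:
--         p, m = divmod(-t, 4)
--         a, c = (0, p) if m == 0 else (4 - m, p + 5 - m)
--     if a + c <= N:
--         return (a, N - a - c, c)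
--     return (-1, -1, -1)
-- ===== Notes on version B (the rewrite author's own statement) =====
-- stated objective: faster
-- what changed: Replaces A's O(N^2) mutate-and-resum greedy walk over a list of bills with an O(1) closed-form solve of 5a-4c=(Y-5000N)/1000 for the minimal-a (max-5000) solution, which is exactly the split A's greedy ends on.
import Mathlib
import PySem

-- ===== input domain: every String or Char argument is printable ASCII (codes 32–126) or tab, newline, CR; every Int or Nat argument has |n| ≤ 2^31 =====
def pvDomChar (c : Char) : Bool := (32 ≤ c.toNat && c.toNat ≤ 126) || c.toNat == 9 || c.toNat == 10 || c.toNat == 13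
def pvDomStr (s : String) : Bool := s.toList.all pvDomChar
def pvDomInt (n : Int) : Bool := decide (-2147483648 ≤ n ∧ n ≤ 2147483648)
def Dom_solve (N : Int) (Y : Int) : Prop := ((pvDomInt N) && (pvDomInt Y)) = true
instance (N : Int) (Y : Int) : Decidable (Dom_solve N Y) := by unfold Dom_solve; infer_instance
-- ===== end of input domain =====

-- B replaces A's greedy mutate-and-resum walk over a list of bills by a closed-form
-- arithmetic computation of the same split (objective: faster).

-- ===== PORT A =====
-- the loop 'for i in range(N+1)' with early return; r[i] = v is pySetD (exact here:
-- every executed assignment is guarded by i < N = len(r) and 0 ≤ i from range)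
def solveLoopA (N Y : Int) (r : List Int) : List Int → List Int
  | [] => [-1, -1, -1]
  | i :: rest =>
    let s := r.sum
    if s = Y then
      [((r.filter (fun d => d == 10000)).length : Int),
       ((r.filter (fun d => d == 5000)).length : Int),
       ((r.filter (fun d => d == 1000)).length : Int)]
    else if s < Y ∧ i < N then solveLoopA N Y (PySem.List.pySetD r i 10000) rest
    else if s > Y ∧ i < N then solveLoopA N Y (PySem.List.pySetD r i 1000) rest
    else solveLoopA N Y r rest

def solve (N : Int) (Y : Int) : List Int :=
  solveLoopA N Y ((PySem.List.pyRange 0 N 1).map (fun _ => (5000 : Int)))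
    (PySem.List.pyRange 0 (N + 1) 1)

-- ===== PORT B =====
def solve_alt (N : Int) (Y : Int) : List Int :=
  if PySem.Int.mod Y 1000 ≠ 0 then [-1, -1, -1]
  else
    let t := PySem.Int.floordiv (Y - 5000 * N) 1000
    let ac : Int × Int :=
      if 0 ≤ t then
        let q := PySem.Int.floordiv t 5
        let r := PySem.Int.mod t 5
        if r = 0 then (q, 0) else (q + r, r)
      else
        let p := PySem.Int.floordiv (-t) 4
        let m := PySem.Int.mod (-t) 4
        if m = 0 then (0, p) else (4 - m, p + 5 - m)
    if ac.1 + ac.2 ≤ N then [ac.1, N - ac.1 - ac.2, ac.2] else [-1, -1, -1]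

-- ===== PRECONDITION & SPEC =====
def Spec_solve (N : Int) (Y : Int) (out : List Int) : Prop := out = solve_alt N Y
instance (N : Int) (Y : Int) (out : List Int) : Decidable (Spec_solve N Y out) := by unfold Spec_solve; infer_instance

-- ===== CLAIM (what is proved, stated in full; the proofs are below) =====
def Claim_equal_solve : Prop := ∀ (N : Int) (Y : Int), Dom_solve N Y → Spec_solve N Y (solve N Y)

-- ===== LEMMAS AND PROOFS =====

-- abstract arithmetic walk mirroring A's loop state (a = #10000-bills, c = #1000-bills)
def walk (N Y : Int) : Nat → Int → Int → List Int
  | 0, a, c =>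
    if 5000 * N + 5000 * a - 4000 * c = Y then [a, N - a - c, c] else [-1, -1, -1]
  | k + 1, a, c =>
    if 5000 * N + 5000 * a - 4000 * c = Y then [a, N - a - c, c]
    else if 5000 * N + 5000 * a - 4000 * c < Y then walk N Y k (a + 1) c
    else walk N Y k a (c + 1)


def walkTarget (e : Int) : Int × Int :=
  if 0 ≤ e then (e / 5 + e % 5, e % 5)
  else if (-e) % 4 = 0 then (0, (-e) / 4)
  else (4 - (-e) % 4, (-e) / 4 + 5 - (-e) % 4)


lemma walkTarget_pos (e : Int) (he : e ≠ 0) : 1 ≤ (walkTarget e).1 + (walkTarget e).2 := by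
  unfold walkTarget; split_ifs <;> simp <;> omega

lemma walkTarget_nonneg (e : Int) : 0 ≤ (walkTarget e).1 ∧ 0 ≤ (walkTarget e).2 := by
  unfold walkTarget; split_ifs <;> constructor <;> simp <;> omega

lemma walkTarget_up (e : Int) (he : 0 < e) :
    walkTarget e = ((walkTarget (e - 5)).1 + 1, (walkTarget (e - 5)).2) := by
  unfold walkTarget; split_ifs <;> simp_all <;> omega

lemma walkTarget_down (e : Int) (he : e < 0) :
    walkTarget e = ((walkTarget (e + 4)).1, (walkTarget (e + 4)).2 + 1) := by
  unfold walkTarget; split_ifs <;> simp_all <;> omega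

lemma walk_eq_closed (N Y : Int) : ∀ (k : Nat) (a c e : Int),
    Y - (5000 * N + 5000 * a - 4000 * c) = 1000 * e →
    walk N Y k a c =
      if (walkTarget e).1 + (walkTarget e).2 ≤ (k : Int)
      then [a + (walkTarget e).1, N - (a + (walkTarget e).1) - (c + (walkTarget e).2),
            c + (walkTarget e).2]
      else [-1, -1, -1] := by
  intro k
  induction k with
  | zero =>
    intro a c e he
    unfold walk
    by_cases h0 : 5000 * N + 5000 * a - 4000 * c = Y
    · have he0 : e = 0 := by omega
      subst he0
      rw [if_pos h0, if_pos (by simp [walkTarget])]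
      simp [walkTarget]
    · rw [if_neg h0, if_neg (by have := walkTarget_pos e (by omega); push_cast; omega)]
  | succ k ih =>
    intro a c e he
    unfold walk
    by_cases h0 : 5000 * N + 5000 * a - 4000 * c = Y
    · have he0 : e = 0 := by omega
      subst he0
      rw [if_pos h0, if_pos (by simp [walkTarget]; omega)]
      simp [walkTarget]
    · rw [if_neg h0]
      by_cases h1 : 5000 * N + 5000 * a - 4000 * c < Y
      · rw [if_pos h1, ih (a + 1) c (e - 5) (by omega), walkTarget_up e (by omega)]
        simp only
        split_ifs <;> simp only [List.cons.injEq, and_true] <;> omega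
      · rw [if_neg h1, ih a (c + 1) (e + 4) (by omega), walkTarget_down e (by omega)]
        simp only
        split_ifs <;> simp only [List.cons.injEq, and_true, true_and] <;> omega

lemma two_val_sum (P : List Int) (h : ∀ x ∈ P, x = 10000 ∨ x = 1000) :
    P.sum = 10000 * (P.count 10000 : Int) + 1000 * (P.count 1000 : Int) ∧
    (P.length : Int) = (P.count 10000 : Int) + (P.count 1000 : Int) := by
  induction P with
  | nil => simp
  | cons x P ih =>
    have ih' := ih (fun y hy => h y (by simp [hy]))
    rcases h x (by simp) with hx | hx <;> subst hx <;>
      refine ⟨?_, ?_⟩ <;> simp [ih'.1, ih'.2] <;> ring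

lemma filt_count (r : List Int) (v : Int) :
    ((r.filter (fun d => d == v)).length : Int) = (r.count v : Int) := by
  simp [List.count]
  rw [List.countP_eq_length_filter]

lemma not_mem_5000 (P : List Int) (h : ∀ x ∈ P, x = 10000 ∨ x = 1000) :
    P.count 5000 = 0 := by
  rw [List.count_eq_zero]
  intro hm; rcases h _ hm with h' | h' <;> norm_num at h'

lemma walk_succ_lt (N Y : Int) (k : Nat) (a c : Int)
    (h2 : 5000 * N + 5000 * a - 4000 * c < Y) :
    walk N Y (k + 1) a c = walk N Y k (a + 1) c := by
  conv_lhs => rw [walk]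
  rw [if_neg (by omega), if_pos h2]

lemma walk_succ_gt (N Y : Int) (k : Nat) (a c : Int)
    (h2 : 5000 * N + 5000 * a - 4000 * c > Y) :
    walk N Y (k + 1) a c = walk N Y k a (c + 1) := by
  conv_lhs => rw [walk]
  rw [if_neg (by omega), if_neg (by omega)]

lemma loop_eq_walk (N Y : Int) : ∀ (k : Nat) (a c : Int) (P : List Int),
    (∀ x ∈ P, x = 10000 ∨ x = 1000) →
    (P.count 10000 : Int) = a → (P.count 1000 : Int) = c →
    (P.length : Int) = N - k →
    solveLoopA N Y (P ++ List.replicate k 5000) (PySem.List.pyRange (N - k) (N + 1) 1)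
      = walk N Y k a c := by
  intro k
  induction k with
  | zero =>
    intro a c P hmem ha hc hlen
    obtain ⟨hsum, hlen2⟩ := two_val_sum P hmem
    rw [show ((0:Nat):Int) = 0 by simp] at hlen ⊢
    rw [show N - 0 = N by ring, PySem.List.pyRange_one_cons (by omega)]
    rw [PySem.List.pyRange_one_eq_nil (by omega)]
    simp only [solveLoopA, List.replicate_zero, List.append_nil]
    by_cases hs : P.sum = Y
    · rw [if_pos hs]
      unfold walk
      rw [if_pos (by omega)]
      simp only [filt_count, not_mem_5000 P hmem, ha, hc]
      push_cast
      simp only [List.cons.injEq, and_true, true_and]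
      omega
    · rw [if_neg hs]
      rw [if_neg (by rintro ⟨h1, h2⟩; omega), if_neg (by rintro ⟨h1, h2⟩; omega)]
      unfold walk
      rw [if_neg (by omega)]
  | succ k ih =>
    intro a c P hmem ha hc hlen
    obtain ⟨hsum, hlen2⟩ := two_val_sum P hmem
    have hiN : N - ((k + 1 : Nat) : Int) < N := by push_cast; omega
    rw [PySem.List.pyRange_one_cons (by push_cast; omega)]
    have hr : P ++ List.replicate (k + 1) 5000 = P ++ 5000 :: List.replicate k 5000 := by
      rw [List.replicate_succ]
    have hsumr : (P ++ List.replicate (k + 1) 5000).sum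
        = 10000 * a + 1000 * c + 5000 * ((k : Int) + 1) := by
      rw [List.sum_append, List.sum_replicate, hsum, ha, hc]
      ring
    simp only [solveLoopA, hsumr]
    by_cases hs : 10000 * a + 1000 * c + 5000 * ((k : Int) + 1) = Y
    · rw [if_pos hs]
      unfold walk
      rw [if_pos (by omega)]
      simp only [filt_count]
      simp [List.count_append, List.count_replicate, not_mem_5000 P hmem]
      refine ⟨by omega, by omega, by omega⟩
    · rw [if_neg hs]
      by_cases hlt : 10000 * a + 1000 * c + 5000 * ((k : Int) + 1) < Y
      · have hc1 : 10000 * a + 1000 * c + 5000 * ((k : Int) + 1) < Y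
            ∧ N - ((k + 1 : Nat) : Int) < N := ⟨hlt, hiN⟩
        rw [if_pos hc1]
        have hset : PySem.List.pySetD (P ++ List.replicate (k + 1) 5000)
            (N - ((k + 1 : Nat) : Int)) 10000 = (P ++ [10000]) ++ List.replicate k 5000 := by
          rw [PySem.List.pySetD_of_nonneg _ _ (show (0:Int) ≤ N - ((k + 1 : Nat) : Int) by push_cast; omega), hr]
          have ht : (N - ((k + 1 : Nat) : Int)).toNat = P.length := by push_cast; omega
          rw [ht, List.set_append_right _ _ (le_refl _)]
          simp
        rw [hset, show N - ((k + 1 : Nat) : Int) + 1 = N - (k : Int) by push_cast; ring]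
        rw [ih (a + 1) c (P ++ [10000])
          (by intro x hx; rcases List.mem_append.mp hx with h | h
              · exact hmem x h
              · simp at h; left; exact h)
          (by rw [List.count_append]; simp; omega)
          (by rw [List.count_append]; simp; omega)
          (by simp; omega)]
        rw [walk_succ_lt N Y k a c (by omega)]
      · have hc0 : ¬ (10000 * a + 1000 * c + 5000 * ((k : Int) + 1) < Y
            ∧ N - ((k + 1 : Nat) : Int) < N) := by rintro ⟨h1, _⟩; omega
        rw [if_neg hc0]
        have hc1 : 10000 * a + 1000 * c + 5000 * ((k : Int) + 1) > Y
            ∧ N - ((k + 1 : Nat) : Int) < N := ⟨by omega, hiN⟩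
        rw [if_pos hc1]
        have hset : PySem.List.pySetD (P ++ List.replicate (k + 1) 5000)
            (N - ((k + 1 : Nat) : Int)) 1000 = (P ++ [1000]) ++ List.replicate k 5000 := by
          rw [PySem.List.pySetD_of_nonneg _ _ (show (0:Int) ≤ N - ((k + 1 : Nat) : Int) by push_cast; omega), hr]
          have ht : (N - ((k + 1 : Nat) : Int)).toNat = P.length := by push_cast; omega
          rw [ht, List.set_append_right _ _ (le_refl _)]
          simp
        rw [hset, show N - ((k + 1 : Nat) : Int) + 1 = N - (k : Int) by push_cast; ring]
        rw [ih a (c + 1) (P ++ [1000])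
          (by intro x hx; rcases List.mem_append.mp hx with h | h
              · exact hmem x h
              · simp at h; right; exact h)
          (by rw [List.count_append]; simp; omega)
          (by rw [List.count_append]; simp; omega)
          (by simp; omega)]
        rw [walk_succ_gt N Y k a c (by omega)]

lemma walk_not_dvd (N Y : Int) (h : ¬ (1000:Int) ∣ Y) :
    ∀ (k : Nat) (a c : Int), walk N Y k a c = [-1, -1, -1] := by
  intro k
  induction k with
  | zero =>
    intro a c; unfold walk
    rw [if_neg (by intro hs; exact h ⟨5 * N + 5 * a - 4 * c, by omega⟩)]
  | succ k ih =>
    intro a c; unfold walk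
    rw [if_neg (by intro hs; exact h ⟨5 * N + 5 * a - 4 * c, by omega⟩)]
    split_ifs <;> simp [ih]

lemma solve_eq_walk (N Y : Int) (hN : 0 ≤ N) : solve N Y = walk N Y N.toNat 0 0 := by
  unfold solve
  have h1 : PySem.List.pyRange 0 (N + 1) 1
      = PySem.List.pyRange (N - (N.toNat : Int)) (N + 1) 1 := by
    rw [Int.toNat_of_nonneg hN]; ring_nf
  have h2 : ((PySem.List.pyRange 0 N 1).map (fun _ => (5000 : Int)))
      = ([] : List Int) ++ List.replicate N.toNat 5000 := by
    rw [List.map_const', PySem.List.length_pyRange_one]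
    simp
  rw [h1, h2, loop_eq_walk N Y N.toNat 0 0 [] (by simp) (by simp) (by simp)
    (by simp [Int.toNat_of_nonneg hN])]

lemma solve_neg (N Y : Int) (hN : N < 0) : solve N Y = [-1, -1, -1] := by
  unfold solve
  rw [PySem.List.pyRange_one_eq_nil (show (N:Int) + 1 ≤ 0 by omega),
    PySem.List.pyRange_one_eq_nil (show (N:Int) ≤ 0 by omega)]
  rfl

lemma solve_alt_closed (N Y : Int) (h : PySem.Int.mod Y 1000 = 0) :
    solve_alt N Y =
      (if (walkTarget ((Y - 5000 * N) / 1000)).1 + (walkTarget ((Y - 5000 * N) / 1000)).2 ≤ N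
       then [(walkTarget ((Y - 5000 * N) / 1000)).1,
             N - (walkTarget ((Y - 5000 * N) / 1000)).1 - (walkTarget ((Y - 5000 * N) / 1000)).2,
             (walkTarget ((Y - 5000 * N) / 1000)).2]
       else [-1, -1, -1]) := by
  unfold solve_alt
  rw [if_neg (fun hc => hc h)]
  simp only [PySem.Int.floordiv_eq_ediv_of_pos (show (0:Int) < 1000 by norm_num),
    PySem.Int.floordiv_eq_ediv_of_pos (show (0:Int) < 5 by norm_num),
    PySem.Int.floordiv_eq_ediv_of_pos (show (0:Int) < 4 by norm_num),
    PySem.Int.mod_eq_emod_of_pos (show (0:Int) < 5 by norm_num),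
    PySem.Int.mod_eq_emod_of_pos (show (0:Int) < 4 by norm_num)]
  unfold walkTarget
  split_ifs <;> simp only [List.cons.injEq, and_true] <;> omega

-- ===== VERDICT (by name: the statement is the Claim_ definition above) =====
theorem solve_spec : Claim_equal_solve := by
  unfold Claim_equal_solve
  intro N Y _
  unfold Spec_solve
  by_cases hY : PySem.Int.mod Y 1000 = 0
  · obtain ⟨y, hy⟩ : (1000:Int) ∣ Y := (PySem.Int.mod_eq_zero_iff_dvd Y 1000).mp hY
    have ht : (Y - 5000 * N) / 1000 = y - 5 * N := by
      rw [hy, show (1000:Int) * y - 5000 * N = 1000 * (y - 5 * N) by ring,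
        Int.mul_ediv_cancel_left _ (by norm_num)]
    rw [solve_alt_closed N Y hY, ht]
    by_cases hN : 0 ≤ N
    · rw [solve_eq_walk N Y hN,
        walk_eq_closed N Y N.toNat 0 0 (y - 5 * N) (by omega),
        Int.toNat_of_nonneg hN]
      simp only [zero_add]
    · rw [solve_neg N Y (by omega), if_neg]
      have := walkTarget_nonneg (y - 5 * N)
      omega
  · have hnd : ¬ (1000:Int) ∣ Y := fun hd => hY ((PySem.Int.mod_eq_zero_iff_dvd Y 1000).mpr hd)
    have halt : solve_alt N Y = [-1, -1, -1] := by
      unfold solve_alt; rw [if_pos hY]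
    rw [halt]
    by_cases hN : 0 ≤ N
    · rw [solve_eq_walk N Y hN]
      exact walk_not_dvd N Y hnd N.toNat 0 0
    · exact solve_neg N Y (by omega)
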